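-- pv_equiv track=rewrite | github.com/MrBrantCode/unitest_baseline | mut_generate/mist_train_cf/cf_40035/solution.py | apply_kernel_operation
-- ===== SOURCE A (Python) =====
-- def apply_kernel_operation(kernel, image):
--     def apply_kernel_pixel(kernel, image, x, y):
--         kernel_size = len(kernel)
--         offset = kernel_size // 2
--         result = 0
--         for i in range(kernel_size):
--             for j in range(kernel_size):
--                 image_x = x - offset + i
--                 image_y = y - offset + j
--                 if 0 <= image_x < len(image) and 0 <= image_y < len(image[0]):
--                     result += kernel[i][j] * image[image_x][image_y]
--         return result
--
--     processed_image = []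
--     for i in range(len(image)):
--         row = []
--         for j in range(len(image[0])):
--             pixel_value = apply_kernel_pixel(kernel, image, i, j)
--             row.append(max(0, min(255, pixel_value)))
--         processed_image.append(row)
--
--     return processed_image
-- ===== SOURCE B (Python) =====
-- def apply_kernel_operation(kernel, image):
--     if not image:
--         return []
--     k = len(kernel)
--     n, m = len(image), len(image[0])
--     off = k // 2
--     pad_after = k - 1 - off
--     zrow = [0] * (m + k - 1)
--     padded = ([zrow] * off
--               + [[0] * off + row[:m] + [0] * pad_after for row in image]
--               + [zrow] * pad_after)
--     return [[max(0, min(255, sum(kernel[a][b] * padded[i + a][j + b]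
--                                  for a in range(k) for b in range(k))))
--              for j in range(m)]
--             for i in range(n)]
-- ===== Notes on version B (the rewrite author's own statement) =====
-- stated objective: simpler
-- what changed: B zero-pads the image once (offset k//2 before, k-1-offset after in each dimension) and then convolves with a full unguarded k×k window via nested comprehensions, instead of A's per-pixel bounds checks inside four nested loops; dropping the per-element bounds test and function call gives a constant-factor speedup. Pre_ excludes ragged kernels/images, on which A usually raises IndexError but sometimes accidentally returns by never touching the missing entries.
-- outside the precondition, e.g. on apply_kernel_operation([[], [], [0, 0, 9], [], []], [[1]]): A returns [[9]], B raises IndexError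
import Mathlib
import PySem

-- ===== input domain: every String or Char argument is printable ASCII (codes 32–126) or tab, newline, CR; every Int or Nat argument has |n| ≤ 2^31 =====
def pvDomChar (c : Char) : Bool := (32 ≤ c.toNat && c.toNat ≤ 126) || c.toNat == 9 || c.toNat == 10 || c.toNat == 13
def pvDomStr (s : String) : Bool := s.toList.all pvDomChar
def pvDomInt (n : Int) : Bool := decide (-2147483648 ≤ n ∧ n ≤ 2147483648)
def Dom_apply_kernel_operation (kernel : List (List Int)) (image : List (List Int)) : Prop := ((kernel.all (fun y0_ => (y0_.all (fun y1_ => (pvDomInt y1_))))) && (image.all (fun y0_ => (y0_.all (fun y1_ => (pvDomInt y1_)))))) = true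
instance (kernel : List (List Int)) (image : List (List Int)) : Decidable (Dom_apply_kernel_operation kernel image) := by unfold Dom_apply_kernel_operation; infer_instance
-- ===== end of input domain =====

-- B replaces A's per-pixel bounds checks by a zero-padded image and an unguarded k×k window (simpler decomposition, same cost).


-- ===== PORT A =====
-- A's inner helper apply_kernel_pixel, step for step (guarded indexing is in range whenever taken)
def applyKernelPixelA (kernel : List (List Int)) (image : List (List Int)) (x y : Int) : Int :=
  let ksize : Int := kernel.length
  let off : Int := PySem.Int.floordiv ksize 2
  (PySem.List.pyRange 0 ksize 1).foldl (fun res i =>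
    (PySem.List.pyRange 0 ksize 1).foldl (fun res j =>
      let ix := x - off + i
      let iy := y - off + j
      if 0 ≤ ix ∧ ix < (image.length : Int) ∧ 0 ≤ iy ∧ iy < ((image.headD []).length : Int) then
        res + PySem.List.pyGetD (PySem.List.pyGetD kernel i []) j 0 *
              PySem.List.pyGetD (PySem.List.pyGetD image ix []) iy 0
      else res) res) 0

def apply_kernel_operation (kernel : List (List Int)) (image : List (List Int)) : List (List Int) :=
  (PySem.List.pyRange 0 (image.length : Int) 1).foldl (fun acc i =>
    acc ++ [(PySem.List.pyRange 0 ((image.headD []).length : Int) 1).foldl (fun row j =>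
      row ++ [max 0 (min 255 (applyKernelPixelA kernel image i j))]) []]) []

-- ===== PORT B =====
def apply_kernel_operation_alt (kernel : List (List Int)) (image : List (List Int)) : List (List Int) :=
  if image = [] then []
  else
    let k := kernel.length
    let n := image.length
    let m := (image.headD []).length
    let off := k / 2
    let padAfter := k - 1 - off
    let zrow : List Int := List.replicate (m + k - 1) 0
    let padded : List (List Int) :=
      List.replicate off zrow ++
      image.map (fun row => List.replicate off 0 ++ row.take m ++ List.replicate padAfter 0) ++
      List.replicate padAfter zrow
    (List.range n).map (fun i =>
      (List.range m).map (fun j =>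
        max 0 (min 255 (((List.range k).map (fun a =>
          ((List.range k).map (fun b =>
            (kernel.getD a []).getD b 0 * ((padded.getD (i + a) []).getD (j + b) 0))).sum)).sum))))

-- ===== PRECONDITION & SPEC =====
-- Pre_ excludes ragged kernels/images (a kernel row shorter than the kernel, or an image row
-- shorter than the first row) when the pixel loops actually run: there A usually raises
-- IndexError, and where it accidentally returns (missing entries never touched) B raises.
def Pre_apply_kernel_operation (kernel : List (List Int)) (image : List (List Int)) : Prop :=
  image = [] ∨ kernel = [] ∨ (image.headD []).length = 0 ∨
    ((∀ r ∈ kernel, kernel.length ≤ r.length) ∧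
     (∀ r ∈ image, (image.headD []).length ≤ r.length))
instance (kernel : List (List Int)) (image : List (List Int)) : Decidable (Pre_apply_kernel_operation kernel image) := by unfold Pre_apply_kernel_operation; infer_instance

def pvWitness_apply_kernel_operation : List (List Int) × List (List Int) :=
  ([[0, 1, 0], [1, -4, 1], [0, 1, 0]], [[10, 20], [30, 40]])

def Spec_apply_kernel_operation (kernel : List (List Int)) (image : List (List Int)) (out : List (List Int)) : Prop := out = apply_kernel_operation_alt kernel image
instance (kernel : List (List Int)) (image : List (List Int)) (out : List (List Int)) : Decidable (Spec_apply_kernel_operation kernel image out) := by unfold Spec_apply_kernel_operation; infer_instance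

-- ===== CLAIM (what is proved, stated in full; the proofs are below) =====
def Claim_equal_apply_kernel_operation : Prop := ∀ (kernel : List (List Int)) (image : List (List Int)), Dom_apply_kernel_operation kernel image → Pre_apply_kernel_operation kernel image → Spec_apply_kernel_operation kernel image (apply_kernel_operation kernel image)

-- ===== LEMMAS AND PROOFS =====

-- proof-only helpers: the padded image of B, and B's per-pixel sum, as named terms
def padB (kernel : List (List Int)) (image : List (List Int)) : List (List Int) :=
  List.replicate (kernel.length / 2) (List.replicate ((image.headD []).length + kernel.length - 1) (0 : Int)) ++
  image.map (fun row => List.replicate (kernel.length / 2) (0 : Int) ++ row.take (image.headD []).length ++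
    List.replicate (kernel.length - 1 - kernel.length / 2) (0 : Int)) ++
  List.replicate (kernel.length - 1 - kernel.length / 2) (List.replicate ((image.headD []).length + kernel.length - 1) (0 : Int))

def sumB (kernel : List (List Int)) (image : List (List Int)) (i j : Nat) : Int :=
  ((List.range kernel.length).map (fun a =>
    ((List.range kernel.length).map (fun b =>
      (kernel.getD a []).getD b 0 * (((padB kernel image).getD (i + a) []).getD (j + b) 0))).sum)).sum

theorem rowpad (row : List Int) (off pa m v : Nat) :
    (List.replicate off (0:Int) ++ row.take m ++ List.replicate pa 0).getD v 0
    = if off ≤ v ∧ v < off + m then row.getD (v - off) 0 else 0 := by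
  simp only [List.getD_eq_getElem?_getD, List.getElem?_append, List.length_append,
    List.length_replicate, List.length_take, List.getElem?_replicate, List.getElem?_take]
  split_ifs <;>
    first
      | rfl
      | omega
      | (rw [show row[v - off]? = (none : Option Int) from List.getElem?_eq_none (by omega)]; (try rfl))

theorem zrowpad (t v : Nat) : (List.replicate t (0:Int)).getD v 0 = 0 := by
  simp only [List.getD_eq_getElem?_getD, List.getElem?_replicate]
  split_ifs <;> rfl

theorem pad_entry (kernel : List (List Int)) (image : List (List Int)) (u v : Nat) :
    ((padB kernel image).getD u []).getD v 0 =
      if kernel.length / 2 ≤ u ∧ u < kernel.length / 2 + image.length ∧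
         kernel.length / 2 ≤ v ∧ v < kernel.length / 2 + (image.headD []).length then
        (image.getD (u - kernel.length / 2) []).getD (v - kernel.length / 2) 0
      else 0 := by
  by_cases h1 : u < kernel.length / 2
  · have hp : (padB kernel image).getD u [] =
        List.replicate ((image.headD []).length + kernel.length - 1) (0 : Int) := by
      unfold padB
      rw [List.getD_eq_getElem?_getD]
      simp only [List.getElem?_append, List.length_append, List.length_replicate, List.length_map]
      rw [if_pos (show u < kernel.length / 2 + image.length by omega), if_pos h1,
        List.getElem?_replicate, if_pos h1]
      rfl
    rw [hp, zrowpad, if_neg (by omega)]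
  · by_cases h2 : u < kernel.length / 2 + image.length
    · obtain ⟨row, hrow⟩ : ∃ row, image[u - kernel.length / 2]? = some row :=
        ⟨_, List.getElem?_eq_getElem (by omega)⟩
      have hgd : image.getD (u - kernel.length / 2) [] = row := by
        rw [List.getD_eq_getElem?_getD, hrow]; rfl
      have hp : (padB kernel image).getD u [] =
          List.replicate (kernel.length / 2) (0 : Int) ++ row.take (image.headD []).length ++
            List.replicate (kernel.length - 1 - kernel.length / 2) (0 : Int) := by
        unfold padB
        rw [List.getD_eq_getElem?_getD]
        simp only [List.getElem?_append, List.length_append, List.length_replicate,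
          List.length_map, List.getElem?_map]
        rw [if_pos (show u < kernel.length / 2 + image.length by omega), if_neg h1, hrow]
        rfl
      rw [hp, rowpad, hgd]
      split_ifs <;> first | rfl | omega
    · have hp : ((padB kernel image).getD u []).getD v 0 = 0 := by
        by_cases h3 : u - (kernel.length / 2 + image.length) < kernel.length - 1 - kernel.length / 2
        · have hz : (padB kernel image).getD u [] =
              List.replicate ((image.headD []).length + kernel.length - 1) (0 : Int) := by
            unfold padB
            rw [List.getD_eq_getElem?_getD]
            simp only [List.getElem?_append, List.length_append, List.length_replicate,
              List.length_map]
            rw [if_neg h2, List.getElem?_replicate, if_pos h3]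
            rfl
          rw [hz]
          exact zrowpad _ _
        · have hz : (padB kernel image).getD u [] = [] := by
            unfold padB
            rw [List.getD_eq_getElem?_getD]
            simp only [List.getElem?_append, List.length_append, List.length_replicate,
              List.length_map]
            rw [if_neg h2, List.getElem?_replicate, if_neg h3]
            rfl
          rw [hz]
          rfl
      rw [hp, if_neg (by omega)]

theorem ite_add_shift (c : Prop) [Decidable c] (r t : Int) :
    (if c then r + t else r) = r + (if c then t else 0) := by
  split <;> simp

theorem pixel_eq (kernel : List (List Int)) (image : List (List Int)) (i j : Nat) :
    applyKernelPixelA kernel image (i : Int) (j : Int) = sumB kernel image i j := by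
  simp only [applyKernelPixelA, sumB]
  rw [show (2 : Int) = ((2 : Nat) : Int) from rfl]
  simp only [PySem.Int.floordiv_natCast, PySem.List.pyRange_zero_natCast, List.foldl_map,
    ite_add_shift, PySem.List.foldl_add, zero_add]
  refine congrArg List.sum (List.map_congr_left fun a _ => ?_)
  refine congrArg List.sum (List.map_congr_left fun b _ => ?_)
  rw [pad_entry]
  by_cases hg : (0 : Int) ≤ (i : Int) - (kernel.length / 2 : Nat) + a ∧
      (i : Int) - (kernel.length / 2 : Nat) + a < (image.length : Int) ∧
      (0 : Int) ≤ (j : Int) - (kernel.length / 2 : Nat) + b ∧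
      (j : Int) - (kernel.length / 2 : Nat) + b < ((image.headD []).length : Int)
  · rw [if_pos hg, if_pos (by omega)]
    rw [show (i : Int) - (kernel.length / 2 : Nat) + a = ((i + a - kernel.length / 2 : Nat) : Int) by omega,
      show (j : Int) - (kernel.length / 2 : Nat) + b = ((j + b - kernel.length / 2 : Nat) : Int) by omega]
    simp only [PySem.List.pyGetD_natCast]
  · rw [if_neg hg, if_neg (by omega), mul_zero]

theorem a_eq (kernel : List (List Int)) (image : List (List Int)) :
    apply_kernel_operation kernel image =
      (List.range image.length).map (fun (i : Nat) =>
        (List.range (image.headD []).length).map (fun (j : Nat) =>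
          max 0 (min 255 (applyKernelPixelA kernel image (i : Int) (j : Int))))) := by
  simp only [apply_kernel_operation, PySem.List.pyRange_zero_natCast, List.foldl_map,
    PySem.List.foldl_append_singleton_eq_map, List.nil_append]

theorem alt_eq (kernel : List (List Int)) (image : List (List Int)) (h : image ≠ []) :
    apply_kernel_operation_alt kernel image =
      (List.range image.length).map (fun i =>
        (List.range (image.headD []).length).map (fun j =>
          max 0 (min 255 (sumB kernel image i j)))) := by
  simp only [apply_kernel_operation_alt, sumB, padB, if_neg h]

theorem ports_eq (kernel : List (List Int)) (image : List (List Int)) :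
    apply_kernel_operation kernel image = apply_kernel_operation_alt kernel image := by
  by_cases h : image = []
  · subst h; rfl
  · rw [a_eq, alt_eq kernel image h]
    simp only [pixel_eq]


-- ===== VERDICT (by name: the statement is the Claim_ definition above) =====
theorem apply_kernel_operation_spec : Claim_equal_apply_kernel_operation :=
  fun kernel image _ _ => ports_eq kernel image
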